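-- pv_equiv track=rewrite | github.com/hokoro/Algorithm | basic/ballthrow.py | solution
-- ===== SOURCE A (Python) =====
-- def solution(numbers, k):
--     answer = 0
--     count = 0
--     i = 0
--     while count != k-1:
--         count += 1
--         i = (i+2)%len(numbers)
--
--     answer = numbers[i]
--     return answer
-- ===== SOURCE B (Python) =====
-- def solution(numbers, k):
--     # closed form: after k-1 steps of +2 mod n, the index is 2*(k-1) % n
--     return numbers[2 * (k - 1) % len(numbers)]
-- ===== Notes on version B (the rewrite author's own statement) =====
-- stated objective: faster
-- what changed: Replaces the O(k) step-by-step while-loop with the closed-form index 2*(k-1) % len(numbers).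
import Mathlib
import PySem

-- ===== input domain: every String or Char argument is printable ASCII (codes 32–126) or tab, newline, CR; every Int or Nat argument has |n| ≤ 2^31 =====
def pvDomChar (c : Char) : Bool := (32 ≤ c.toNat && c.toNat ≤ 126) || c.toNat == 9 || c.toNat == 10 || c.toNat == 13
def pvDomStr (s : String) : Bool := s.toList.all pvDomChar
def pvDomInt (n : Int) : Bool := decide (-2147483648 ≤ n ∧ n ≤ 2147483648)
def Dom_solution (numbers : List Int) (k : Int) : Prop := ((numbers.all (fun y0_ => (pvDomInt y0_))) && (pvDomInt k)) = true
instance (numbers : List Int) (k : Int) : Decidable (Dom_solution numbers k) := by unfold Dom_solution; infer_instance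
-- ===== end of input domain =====

-- B replaces A's O(k) while-loop with the closed-form index 2*(k-1) % len(numbers).


-- ===== PORT A =====
-- the while-loop runs (k-1) iterations under Pre_ (count 0,1,…,k-2); ported as fuel recursion
def solutionGo (n : Int) : Nat → Int → Int
  | 0, i => i
  | m + 1, i => solutionGo n m (PySem.Int.mod (i + 2) n)

def solution (numbers : List Int) (k : Int) : Int :=
  let i := solutionGo (numbers.length : Int) (k - 1).toNat 0
  (PySem.List.pyGet? numbers i).getD 0

-- ===== PORT B =====
def solution_alt (numbers : List Int) (k : Int) : Int :=
  (PySem.List.pyGet? numbers (PySem.Int.mod (2 * (k - 1)) (numbers.length : Int))).getD 0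

-- ===== PRECONDITION & SPEC =====
-- Pre_ excludes numbers = [] (A raises ZeroDivisionError/IndexError) and k < 1 (A's while-loop never terminates)
def Pre_solution (numbers : List Int) (k : Int) : Prop := numbers ≠ [] ∧ 1 ≤ k
instance (numbers : List Int) (k : Int) : Decidable (Pre_solution numbers k) := by unfold Pre_solution; infer_instance
def pvWitness_solution : List Int × Int := ([3, 1, 4], 5)
def Spec_solution (numbers : List Int) (k : Int) (out : Int) : Prop := out = solution_alt numbers k
instance (numbers : List Int) (k : Int) (out : Int) : Decidable (Spec_solution numbers k out) := by unfold Spec_solution; infer_instance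

-- ===== CLAIM (what is proved, stated in full; the proofs are below) =====
def Claim_equal_solution : Prop := ∀ (numbers : List Int) (k : Int), Dom_solution numbers k → Pre_solution numbers k → Spec_solution numbers k (solution numbers k)

-- ===== LEMMAS AND PROOFS =====

-- loop invariant: m steps of +2 starting from i mod n land on (i + 2*m) mod n
theorem solutionGo_eq (n : Int) (hn : 0 < n) :
    ∀ (m : Nat) (i : Int), solutionGo n m (PySem.Int.mod i n) = PySem.Int.mod (i + 2 * m) n := by
  intro m
  induction m with
  | zero => intro i; simp [solutionGo]
  | succ m ih =>
    intro i
    have h1 : PySem.Int.mod (PySem.Int.mod i n + 2) n = PySem.Int.mod (i + 2) n := by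
      simp [PySem.Int.mod_eq_emod_of_pos hn, Int.emod_add_emod]
    calc solutionGo n (m + 1) (PySem.Int.mod i n)
        = solutionGo n m (PySem.Int.mod (i + 2) n) := by simp [solutionGo, h1]
      _ = PySem.Int.mod ((i + 2) + 2 * m) n := ih (i + 2)
      _ = PySem.Int.mod (i + 2 * (m + 1 : Nat)) n := by
          congr 1
          push_cast
          ring
-- ===== VERDICT (by name: the statement is the Claim_ definition above) =====
theorem solution_spec : Claim_equal_solution := by
  intro numbers k _ hpre
  obtain ⟨hne, hk⟩ := hpre
  have hn : 0 < (numbers.length : Int) := by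
    have : numbers.length ≠ 0 := by simpa using (List.length_pos_iff.mpr hne).ne'
    omega
  unfold Spec_solution solution solution_alt
  have h0 : (0 : Int) = PySem.Int.mod 0 (numbers.length : Int) := by
    simp [PySem.Int.mod_eq_emod_of_pos hn]
  rw [h0, solutionGo_eq _ hn]
  have : ((k - 1).toNat : Int) = k - 1 := Int.toNat_of_nonneg (by omega)
  rw [this]
  ring_nf
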